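-- pv_equiv track=rewrite | github.com/lucad5/AoC-2023 | solution/part_2.py | determine_position_of_each_number_in_a_string
-- ===== SOURCE A (Python) =====
-- def determine_position_of_each_number_in_a_string(string_from_list, spelled_out_numbers_and_their_numerical_equivalents):
--     """ Returns a dictionary (numbers_and_their_positions) that contains:
--     keys: each number that occurs in each string of the list passed to the function
--     values: the index of each instance a particular number (key) occurs within the string.
--     """
--
--     # Determine the index for each digit in the string
--     numbers_and_their_positions = {}
--     for index, character in enumerate(string_from_list):
--         if character.isdigit():
--             if numbers_and_their_positions.get(character) == None:
--                 numbers_and_their_positions[character] = []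
--             numbers_and_their_positions[character].append(index)
--     numbers_in_current_line = []
--
--     # Determine the position (index of first letter) of each spelled-out number in the string
--     for spelled_out_number in spelled_out_numbers_and_their_numerical_equivalents:
--
--         index_of_spelled_out_number = 0
--         spelled_out_number_as_digit = None
--
--         if spelled_out_number in string_from_list:
--             # set spelled_out_number_as_digit to be the spelled-out number as a digit
--             # example: if spelled_out_number is "three", then spelled_out_number_as_digit will be 3
--             spelled_out_number_as_digit = spelled_out_numbers_and_their_numerical_equivalents[spelled_out_number]
--
--             if numbers_and_their_positions.get(spelled_out_number_as_digit) == None: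
--                 numbers_and_their_positions[spelled_out_number_as_digit] = []
--
--             # find every instance of the spelled out number in the string, going from left to right
--             while index_of_spelled_out_number < len(string_from_list):
--                 if string_from_list[index_of_spelled_out_number:].find(spelled_out_number) == -1:
--                     break
--
--                 elif string_from_list[index_of_spelled_out_number:].find(spelled_out_number) != -1:
--                     if index_of_spelled_out_number == 0:
--                         numbers_and_their_positions[spelled_out_number_as_digit].append(string_from_list[index_of_spelled_out_number:].find(spelled_out_number))
--
--                         index_of_spelled_out_number += string_from_list[index_of_spelled_out_number:].find(spelled_out_number) + len(spelled_out_number)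
--
--                     elif index_of_spelled_out_number > 0:
--                         numbers_and_their_positions[spelled_out_number_as_digit].append(string_from_list[index_of_spelled_out_number:].find(spelled_out_number)+index_of_spelled_out_number)
--                         index_of_spelled_out_number += len(spelled_out_number) + string_from_list[index_of_spelled_out_number:].find(spelled_out_number)
--
--     return numbers_and_their_positions
-- ===== SOURCE B (Python) =====
-- def determine_position_of_each_number_in_a_string(string_from_list, spelled_out_numbers_and_their_numerical_equivalents):
--     """Same result as A, computed the other way round: per-key comprehensions instead of
--     a single appending scan, and for each spelled-out word the full (overlapping)
--     occurrence list is enumerated first and the greedy non-overlapping subset is then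
--     selected by a threshold filter (no advancing pointer scan)."""
--     result = {}
--     for ch in string_from_list:
--         if ch.isdigit() and ch not in result:
--             result[ch] = [i for i, c in enumerate(string_from_list) if c == ch]
--
--     for word, digit in spelled_out_numbers_and_their_numerical_equivalents.items():
--         if word in string_from_list:
--             occurrences = [i for i in range(len(string_from_list))
--                            if string_from_list.startswith(word, i)]
--             picked, bound = [], 0
--             for i in occurrences:
--                 if i >= bound:
--                     picked.append(i)
--                     bound = i + len(word)
--             result.setdefault(digit, []).extend(picked)
--
--     return result
-- ===== Notes on version B (the rewrite author's own statement) =====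
-- stated objective: alternative
-- what changed: Phase 1 no longer appends indices during the scan: each digit key is filled once, at its first occurrence, by a per-key comprehension over the whole string; phase 2 replaces A's advancing slice/str.find matcher by enumerating ALL (overlapping) occurrence positions with a range comprehension and then selecting the greedy non-overlapping subset with a threshold filter.
import Mathlib
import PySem

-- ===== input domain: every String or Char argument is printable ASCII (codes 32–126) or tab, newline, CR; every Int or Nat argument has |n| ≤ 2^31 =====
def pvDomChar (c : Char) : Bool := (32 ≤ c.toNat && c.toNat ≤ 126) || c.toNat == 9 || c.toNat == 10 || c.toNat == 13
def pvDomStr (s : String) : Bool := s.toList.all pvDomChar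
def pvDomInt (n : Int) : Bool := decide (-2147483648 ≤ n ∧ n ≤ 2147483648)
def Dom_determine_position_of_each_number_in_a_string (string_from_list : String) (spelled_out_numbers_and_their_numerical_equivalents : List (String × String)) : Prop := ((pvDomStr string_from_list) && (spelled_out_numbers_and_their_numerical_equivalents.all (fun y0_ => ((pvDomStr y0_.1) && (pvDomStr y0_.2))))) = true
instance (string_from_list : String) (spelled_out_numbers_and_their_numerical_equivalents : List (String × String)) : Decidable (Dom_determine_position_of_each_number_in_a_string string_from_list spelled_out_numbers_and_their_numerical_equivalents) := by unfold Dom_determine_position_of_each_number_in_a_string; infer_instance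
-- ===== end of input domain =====

-- B computes the same dictionary the other way round: phase 1 fills each digit key by a
-- per-key comprehension at its first occurrence, and phase 2 first enumerates ALL
-- (overlapping) occurrence positions of each word and then selects the greedy
-- non-overlapping subset by a threshold filter (objective: alternative).

-- ===== PORT A =====
-- A's inner while loop: repeatedly slices string_from_list[i:], finds the word, appends the
-- position into the dict and advances; the fuel argument (|s|+1, enough for every nonempty
-- word) only totalises the recursion — on an empty word Python A loops forever (outside Pre_).
def pvAInner (s w : List Char) (key : String) (i : Nat) (fuel : Nat)
    (d : PySem.Dict String (List Int)) : PySem.Dict String (List Int) :=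
  match fuel with
  | 0 => d
  | fuel + 1 =>
    if i < s.length then
      let f := PySem.Chars.find (s.drop i) w
      if f = -1 then d
      else if i = 0 then
        pvAInner s w key (i + (f.toNat + w.length)) fuel (d.modify key [] (· ++ [f]))
      else
        pvAInner s w key (i + (w.length + f.toNat)) fuel (d.modify key [] (· ++ [f + (i : Int)]))
    else d

def determine_position_of_each_number_in_a_string (string_from_list : String) (spelled_out_numbers_and_their_numerical_equivalents : List (String × String)) : List (String × List Int) :=
  let s := string_from_list.toList
  -- phase 1: scan the string once, appending each digit's index under its key
  let d1 := (PySem.List.enumerate s 0).foldl (fun d p =>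
      if PySem.Chars.isdigit p.2 then
        let d' := if d.get? (String.ofList [p.2]) = none then d.insert (String.ofList [p.2]) [] else d
        d'.modify (String.ofList [p.2]) [] (· ++ [p.1])
      else d) PySem.Dict.empty
  -- phase 2: Python iterates the dict's keys and looks each value up; the KeyError default ""
  -- is unreachable (the key comes from the dict itself)
  let d2 := (spelled_out_numbers_and_their_numerical_equivalents.map (·.1)).foldl (fun d w =>
      if PySem.Chars.isIn w.toList s then
        let digit := ((PySem.Dict.mk spelled_out_numbers_and_their_numerical_equivalents).get? w).getD ""
        let d' := if d.get? digit = none then d.insert digit [] else d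
        pvAInner s w.toList digit 0 (s.length + 1) d'
      else d) d1
  d2.items

-- ===== PORT B =====
-- Source B's phase-1 comprehension [i for i, c in enumerate(string_from_list) if c == ch]
def pvAllIdx (s : List Char) (c : Char) : List Int :=
  ((PySem.List.enumerate s 0).filter (fun p => p.2 == c)).map (·.1)

-- Source B's comprehension [i for i in range(len(s)) if s.startswith(word, i)]; the range
-- index is nonnegative, so s.startswith(word, i) is startswith on the drop at i
def pvOcc (s w : List Char) : List Int :=
  (PySem.List.pyRange 0 (s.length : Int) 1).filter
    (fun i => PySem.Chars.startswith (s.drop i.toNat) w)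

def determine_position_of_each_number_in_a_string_alt (string_from_list : String) (spelled_out_numbers_and_their_numerical_equivalents : List (String × String)) : List (String × List Int) :=
  let s := string_from_list.toList
  -- phase 1: on the first occurrence of a digit, store ALL its indices by a comprehension
  let d1 := s.foldl (fun d c =>
      if PySem.Chars.isdigit c && !(d.contains (String.ofList [c])) then
        d.insert (String.ofList [c]) (pvAllIdx s c)
      else d) PySem.Dict.empty
  -- phase 2: all occurrences first, then the greedy non-overlapping selection (picked/bound)
  let d2 := spelled_out_numbers_and_their_numerical_equivalents.foldl (fun d p =>
      if PySem.Chars.isIn p.1.toList s then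
        let picked := ((pvOcc s p.1.toList).foldl
            (fun st i => if st.2 ≤ i then (st.1 ++ [i], i + (p.1.toList.length : Int)) else st)
            (([] : List Int), (0 : Int))).1
        (d.setdefault p.2 []).modify p.2 [] (· ++ picked)
      else d) d1
  d2.items

-- ===== PRECONDITION & SPEC =====
-- Pre_ excludes (a) an empty spelled-out word combined with a NONEMPTY string — there
-- Python A's while loop never advances and A diverges (returns nothing) — and (b)
-- association lists with duplicate keys, which do not represent a Python dict
-- (Python would collapse them, keeping the last value).
def Pre_determine_position_of_each_number_in_a_string (string_from_list : String) (spelled_out_numbers_and_their_numerical_equivalents : List (String × String)) : Prop :=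
  (∀ p ∈ spelled_out_numbers_and_their_numerical_equivalents, p.1 ≠ "" ∨ string_from_list = "") ∧
  (spelled_out_numbers_and_their_numerical_equivalents.map Prod.fst).Nodup
instance (string_from_list : String) (spelled_out_numbers_and_their_numerical_equivalents : List (String × String)) : Decidable (Pre_determine_position_of_each_number_in_a_string string_from_list spelled_out_numbers_and_their_numerical_equivalents) := by unfold Pre_determine_position_of_each_number_in_a_string; infer_instance

def pvWitness_determine_position_of_each_number_in_a_string : String × (List (String × String)) :=
  ("two1twox", [("two", "2"), ("nine", "9")])

def Spec_determine_position_of_each_number_in_a_string (string_from_list : String) (spelled_out_numbers_and_their_numerical_equivalents : List (String × String)) (out : List (String × List Int)) : Prop := out = determine_position_of_each_number_in_a_string_alt string_from_list spelled_out_numbers_and_their_numerical_equivalents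
instance (string_from_list : String) (spelled_out_numbers_and_their_numerical_equivalents : List (String × String)) (out : List (String × List Int)) : Decidable (Spec_determine_position_of_each_number_in_a_string string_from_list spelled_out_numbers_and_their_numerical_equivalents out) := by unfold Spec_determine_position_of_each_number_in_a_string; infer_instance

-- ===== CLAIM (what is proved, stated in full; the proofs are below) =====
def Claim_equal_determine_position_of_each_number_in_a_string : Prop := ∀ (string_from_list : String) (spelled_out_numbers_and_their_numerical_equivalents : List (String × String)), Dom_determine_position_of_each_number_in_a_string string_from_list spelled_out_numbers_and_their_numerical_equivalents → Pre_determine_position_of_each_number_in_a_string string_from_list spelled_out_numbers_and_their_numerical_equivalents → Spec_determine_position_of_each_number_in_a_string string_from_list spelled_out_numbers_and_their_numerical_equivalents (determine_position_of_each_number_in_a_string string_from_list spelled_out_numbers_and_their_numerical_equivalents)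

-- ===== LEMMAS AND PROOFS =====

-- the single-character key is injective
lemma pvKeyInj {a b : Char} (h : String.ofList [a] = String.ofList [b]) : a = b := by
  simpa using congrArg String.toList h

lemma pvKeyBeq (a b : Char) : ((String.ofList [a]) == (String.ofList [b])) = (a == b) := by
  by_cases h : a = b
  · simp [h]
  · rw [beq_eq_false_iff_ne.mpr (fun hh => h (pvKeyInj hh)), beq_eq_false_iff_ne.mpr h]

-- A's ensure-then-append on a key equals a plain modify
lemma pvEnsureModify (d : PySem.Dict String (List Int)) (k : String) (f : List Int → List Int) :
    (if d.get? k = none then d.insert k [] else d).modify k [] f = d.modify k [] f := by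
  by_cases hc : d.contains k = true
  · rw [if_neg]
    simp [PySem.Dict.get?_eq_none_iff_contains, hc]
  · rw [if_pos (by simp [PySem.Dict.get?_eq_none_iff_contains]; simpa using hc)]
    show (d.insert k []).insert k (f ((d.insert k []).getD k [])) = d.insert k (f (d.getD k []))
    have h0 : d.getD k [] = [] := PySem.Dict.getD_of_not_contains d [] (by simpa using hc)
    rw [PySem.Dict.getD_insert_self, PySem.Dict.insert_insert_self, h0]

lemma pvEnsureEqSetdefault (d : PySem.Dict String (List Int)) (k : String) :
    (if d.get? k = none then d.insert k [] else d) = d.setdefault k [] := by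
  by_cases hc : d.contains k = true
  · rw [if_neg, PySem.Dict.setdefault_of_contains d [] hc]
    simp [PySem.Dict.get?_eq_none_iff_contains, hc]
  · rw [if_pos, PySem.Dict.setdefault_of_not_contains d [] (by simpa using hc)]
    simp [PySem.Dict.get?_eq_none_iff_contains, hc]

-- ---------- phase 1 ----------

-- the (key, index) pairs A's phase-1 loop feeds into modify-append
def pvPairs (l : List (Int × Char)) : List (String × Int) :=
  (l.filter (fun p => PySem.Chars.isdigit p.2)).map (fun p => (String.ofList [p.2], p.1))

lemma pvA1_eq_modifyFold : ∀ (l : List (Int × Char)) (d : PySem.Dict String (List Int)),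
    l.foldl (fun d p =>
      if PySem.Chars.isdigit p.2 then
        let d' := if d.get? (String.ofList [p.2]) = none then d.insert (String.ofList [p.2]) [] else d
        d'.modify (String.ofList [p.2]) [] (· ++ [p.1])
      else d) d
    = (pvPairs l).foldl (fun d q => d.modify q.1 [] (· ++ [q.2])) d := by
  intro l
  induction l with
  | nil => intro d; rfl
  | cons p t ih =>
    intro d
    by_cases hd : PySem.Chars.isdigit p.2
    · simp only [List.foldl_cons, pvPairs, List.filter_cons, hd, if_pos, List.map_cons]
      rw [pvEnsureModify]
      exact ih _
    · simp only [List.foldl_cons, pvPairs, List.filter_cons]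
      simp only [hd, Bool.false_eq_true, ite_false]
      exact ih _

-- B's phase-1 loop: the final lookup of a single-character key
lemma pvB1_get? (s : List Char) : ∀ (l : List Char) (d : PySem.Dict String (List Int)) (c : Char),
    (l.foldl (fun d c =>
        if PySem.Chars.isdigit c && !(d.contains (String.ofList [c])) then
          d.insert (String.ofList [c]) (pvAllIdx s c)
        else d) d).get? (String.ofList [c]) =
      if d.contains (String.ofList [c]) = true then d.get? (String.ofList [c])
      else if PySem.Chars.isdigit c = true ∧ c ∈ l then some (pvAllIdx s c) else none := by
  intro l
  induction l with
  | nil =>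
    intro d c
    simp only [List.foldl_nil, List.not_mem_nil, and_false, if_false]
    by_cases hc : d.contains (String.ofList [c]) = true
    · rw [if_pos hc]
    · rw [if_neg hc]
      rw [PySem.Dict.get?_eq_none_iff_contains]
      simpa using hc
  | cons c' t ih =>
    intro d c
    simp only [List.foldl_cons]
    by_cases hg : (PySem.Chars.isdigit c' && !(d.contains (String.ofList [c']))) = true
    · rw [if_pos hg, ih]
      obtain ⟨hdig', hnc'⟩ : PySem.Chars.isdigit c' = true ∧
          d.contains (String.ofList [c']) = false := by simpa using hg
      by_cases hcc : c' = c
      · subst hcc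
        rw [if_pos (PySem.Dict.contains_insert_self ..), PySem.Dict.get?_insert_self,
          if_neg (by simp [hnc']), if_pos ⟨hdig', List.mem_cons_self⟩]
      · have hkne : String.ofList [c] ≠ String.ofList [c'] := fun h => hcc (pvKeyInj h).symm
        have hcontains : (d.insert (String.ofList [c']) (pvAllIdx s c')).contains (String.ofList [c]) =
            d.contains (String.ofList [c]) := by
          rw [PySem.Dict.contains_insert, pvKeyBeq, beq_eq_false_iff_ne.mpr (fun h => hcc h.symm)]
          simp
        have hmem : (c ∈ c' :: t) ↔ (c ∈ t) :=
          ⟨fun h => (List.mem_cons.mp h).resolve_left (fun h => hcc h.symm),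
           List.mem_cons_of_mem _⟩
        rw [PySem.Dict.get?_insert_of_ne _ _ hkne, hcontains]
        simp only [hmem]
    · rw [if_neg hg, ih]
      by_cases hcc : c' = c
      · subst hcc
        by_cases hc : d.contains (String.ofList [c']) = true
        · rw [if_pos hc, if_pos hc]
        · have hcf : d.contains (String.ofList [c']) = false := by simpa using hc
          have hdig : PySem.Chars.isdigit c' = false := by
            cases hv : PySem.Chars.isdigit c'
            · rfl
            · exact absurd (by simp [hv, hcf]) hg
          rw [if_neg hc, if_neg hc, if_neg (by simp [hdig]), if_neg (by simp [hdig])]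
      · have hmem : (c ∈ c' :: t) ↔ (c ∈ t) :=
          ⟨fun h => (List.mem_cons.mp h).resolve_left (fun h => hcc h.symm),
           List.mem_cons_of_mem _⟩
        simp only [hmem]

-- B's phase-1 loop: the key list evolves by Set.add over the digit keys
lemma pvB1_keys (s : List Char) : ∀ (l : List Char) (d : PySem.Dict String (List Int)),
    (l.foldl (fun d c =>
        if PySem.Chars.isdigit c && !(d.contains (String.ofList [c])) then
          d.insert (String.ofList [c]) (pvAllIdx s c)
        else d) d).keys =
      PySem.Set.update d.keys ((l.filter (fun c => PySem.Chars.isdigit c)).map (fun c => String.ofList [c])) := by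
  intro l
  induction l with
  | nil => intro d; rfl
  | cons c t ih =>
    intro d
    simp only [List.foldl_cons]
    by_cases hd : PySem.Chars.isdigit c = true
    · rw [List.filter_cons, if_pos hd, List.map_cons]
      have hstep : PySem.Set.update d.keys
          (String.ofList [c] :: (t.filter (fun c => PySem.Chars.isdigit c)).map (fun c => String.ofList [c]))
          = PySem.Set.update (PySem.Set.add d.keys (String.ofList [c]))
            ((t.filter (fun c => PySem.Chars.isdigit c)).map (fun c => String.ofList [c])) := rfl
      rw [hstep]
      by_cases hc : d.contains (String.ofList [c]) = true
      · rw [if_neg (by simp [hc]), ih]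
        have hmemk : String.ofList [c] ∈ d.keys := (PySem.Dict.contains_iff_mem_keys ..).mp hc
        have hadd : PySem.Set.add d.keys (String.ofList [c]) = d.keys := by
          simp [PySem.Set.add, hmemk]
        rw [hadd]
      · have hcf : d.contains (String.ofList [c]) = false := by simpa using hc
        rw [if_pos (by simp [hd, hcf]), ih,
          PySem.Dict.keys_insert_of_not_contains _ _ hcf]
        have hnmem : ¬ String.ofList [c] ∈ d.keys :=
          fun h => hc ((PySem.Dict.contains_iff_mem_keys ..).mpr h)
        have hadd : PySem.Set.add d.keys (String.ofList [c]) = d.keys ++ [String.ofList [c]] := by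
          simp [PySem.Set.add, hnmem]
        rw [hadd]
    · have hdf : PySem.Chars.isdigit c = false := by simpa using hd
      rw [List.filter_cons, if_neg (by simp [hdf]), if_neg (by simp [hdf])]
      exact ih d

-- the pairs fed by A for a fixed digit key are exactly B's comprehension
lemma pvPairs_filter (s : List Char) (c : Char) (hdig : PySem.Chars.isdigit c = true) :
    ((pvPairs (PySem.List.enumerate s 0)).filter (fun q => q.1 == String.ofList [c])).map (·.2) =
      pvAllIdx s c := by
  unfold pvPairs pvAllIdx
  rw [List.filter_map, List.map_map]
  have h1 : ((PySem.List.enumerate s 0).filter (fun p => PySem.Chars.isdigit p.2)).filter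
      ((fun q => q.1 == String.ofList [c]) ∘ (fun p => (String.ofList [p.2], p.1)))
      = (PySem.List.enumerate s 0).filter (fun p => p.2 == c) := by
    rw [List.filter_filter]
    apply List.filter_congr
    intro p _
    simp only [Function.comp_apply]
    rw [pvKeyBeq]
    by_cases hpc : p.2 = c
    · simp [hpc, hdig]
    · simp [beq_eq_false_iff_ne.mpr hpc]
  rw [h1]
  rfl

-- phase 1 of A equals phase 1 of B, as dictionaries
lemma pvPhase1 (s : List Char) :
    (PySem.List.enumerate s 0).foldl (fun d p =>
      if PySem.Chars.isdigit p.2 then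
        let d' := if d.get? (String.ofList [p.2]) = none then d.insert (String.ofList [p.2]) [] else d
        d'.modify (String.ofList [p.2]) [] (· ++ [p.1])
      else d) PySem.Dict.empty
    = s.foldl (fun d c =>
        if PySem.Chars.isdigit c && !(d.contains (String.ofList [c])) then
          d.insert (String.ofList [c]) (pvAllIdx s c)
        else d) PySem.Dict.empty := by
  rw [pvA1_eq_modifyFold]
  have hkeysEq : (pvPairs (PySem.List.enumerate s 0)).map Prod.fst
      = (s.filter (fun c => PySem.Chars.isdigit c)).map (fun c => String.ofList [c]) := by
    have h2 : s.filter (fun c => PySem.Chars.isdigit c)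
        = ((PySem.List.enumerate s 0).filter (fun p => PySem.Chars.isdigit p.2)).map (·.2) := by
      conv_lhs => rw [← PySem.List.map_snd_enumerate s 0]
      rw [List.filter_map]
      rfl
    unfold pvPairs
    rw [h2, List.map_map, List.map_map]
    rfl
  have hkeysA : ((pvPairs (PySem.List.enumerate s 0)).foldl
        (fun d q => d.modify q.1 [] (· ++ [q.2])) PySem.Dict.empty).keys
      = PySem.Set.update PySem.Dict.empty.keys ((pvPairs (PySem.List.enumerate s 0)).map Prod.fst) :=
    PySem.Dict.keys_foldl_modify_key (l := pvPairs (PySem.List.enumerate s 0)) (key := Prod.fst)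
      (d0 := []) (f := fun _ q => (· ++ [q.2])) (d := PySem.Dict.empty)
  have hkeysB := pvB1_keys s s PySem.Dict.empty
  have hnodupA : ((pvPairs (PySem.List.enumerate s 0)).foldl
        (fun d q => d.modify q.1 [] (· ++ [q.2])) PySem.Dict.empty).keys.Nodup :=
    PySem.Dict.nodup_keys_foldl_modify_key (l := pvPairs (PySem.List.enumerate s 0))
      (key := Prod.fst) (d0 := []) (f := fun _ q => (· ++ [q.2])) (d := PySem.Dict.empty)
      (by simp [PySem.Dict.keys_empty])
  have hnodupB : (s.foldl (fun d c =>
        if PySem.Chars.isdigit c && !(d.contains (String.ofList [c])) then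
          d.insert (String.ofList [c]) (pvAllIdx s c)
        else d) PySem.Dict.empty).keys.Nodup := by
    rw [hkeysB, PySem.Dict.keys_empty]
    exact PySem.Set.nodup_ofList _
  apply PySem.Dict.ext
  rw [PySem.Dict.items_eq_map_keys _ hnodupA [], PySem.Dict.items_eq_map_keys _ hnodupB [],
    hkeysA, hkeysB, hkeysEq, PySem.Dict.keys_empty]
  apply List.map_congr_left
  intro k hk
  have hk' : k ∈ (s.filter (fun c => PySem.Chars.isdigit c)).map (fun c => String.ofList [c]) := by
    rw [show PySem.Set.update ([] : List String)
        ((s.filter (fun c => PySem.Chars.isdigit c)).map (fun c => String.ofList [c]))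
        = PySem.Set.ofList ((s.filter (fun c => PySem.Chars.isdigit c)).map (fun c => String.ofList [c]))
      from rfl] at hk
    exact (PySem.Set.mem_ofList ..).mp hk
  obtain ⟨c, hcf, rfl⟩ := List.mem_map.mp hk'
  obtain ⟨hcs, hcd⟩ := List.mem_filter.mp hcf
  have hgetA : ((pvPairs (PySem.List.enumerate s 0)).foldl
        (fun d q => d.modify q.1 [] (· ++ [q.2])) PySem.Dict.empty).getD (String.ofList [c]) []
      = pvAllIdx s c := by
    rw [PySem.Dict.getD_foldl_modify_append, PySem.Dict.getD_empty, List.nil_append,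
      pvPairs_filter s c hcd]
  have hgetB : (s.foldl (fun d c =>
        if PySem.Chars.isdigit c && !(d.contains (String.ofList [c])) then
          d.insert (String.ofList [c]) (pvAllIdx s c)
        else d) PySem.Dict.empty).getD (String.ofList [c]) [] = pvAllIdx s c := by
    rw [PySem.Dict.getD_eq_get?_getD, pvB1_get? s s PySem.Dict.empty c,
      if_neg (by simp [PySem.Dict.contains_empty]), if_pos ⟨hcd, hcs⟩]
    rfl
  rw [hgetA, hgetB]

lemma pvPhase1_nodup (s : List Char) :
    ((PySem.List.enumerate s 0).foldl (fun d p =>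
      if PySem.Chars.isdigit p.2 then
        let d' := if d.get? (String.ofList [p.2]) = none then d.insert (String.ofList [p.2]) [] else d
        d'.modify (String.ofList [p.2]) [] (· ++ [p.1])
      else d) PySem.Dict.empty).keys.Nodup := by
  rw [pvA1_eq_modifyFold]
  exact PySem.Dict.nodup_keys_foldl_modify_key _ Prod.fst [] (fun _ q => (· ++ [q.2])) _
    (by simp [PySem.Dict.keys_empty])

-- ---------- phase 2 ----------

-- the position list A's inner loop appends (proof-side mirror of pvAInner)
def pvAList (s w : List Char) (i : Nat) (fuel : Nat) : List Int :=
  match fuel with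
  | 0 => []
  | fuel + 1 =>
    if i < s.length then
      if PySem.Chars.find (s.drop i) w = -1 then []
      else if i = 0 then
        PySem.Chars.find (s.drop i) w :: pvAList s w (i + ((PySem.Chars.find (s.drop i) w).toNat + w.length)) fuel
      else
        (PySem.Chars.find (s.drop i) w + (i : Int)) :: pvAList s w (i + (w.length + (PySem.Chars.find (s.drop i) w).toNat)) fuel
    else []

lemma pvModifyModify {d : PySem.Dict String (List Int)} (k : String) (d0 : List Int)
    (f g : List Int → List Int) :
    (d.modify k d0 f).modify k d0 g = d.modify k d0 (fun v => g (f v)) := by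
  show (d.modify k d0 f).insert k (g ((d.modify k d0 f).getD k d0)) = _
  rw [PySem.Dict.getD_modify_self]
  show (d.insert k (f (d.getD k d0))).insert k (g (f (d.getD k d0))) = _
  rw [PySem.Dict.insert_insert_self]
  rfl

-- reference matcher (proof-side only): the greedy left-to-right non-overlapping match
-- positions, by well-founded recursion (max 1 _ only for termination; = w.length on Pre_)
def pvSpecScan (s w : List Char) (i : Nat) : List Int :=
  if h : i < s.length then
    if w <+: s.drop i then (i : Int) :: pvSpecScan s w (i + max 1 w.length)
    else pvSpecScan s w (i + 1)
  else []
  termination_by s.length - i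
  decreasing_by all_goals omega

lemma pvSpecScan_stop {s w : List Char} {i : Nat} (h : ¬ i < s.length) :
    pvSpecScan s w i = [] := by
  rw [pvSpecScan]; simp [h]

-- the head of a spec scan at a match position
lemma pvSpecScan_match {s w : List Char} (hw : w ≠ []) {i : Nat} (hp : w <+: s.drop i) :
    pvSpecScan s w i = (i : Int) :: pvSpecScan s w (i + w.length) := by
  have hlen : i < s.length := by
    by_contra h
    have : s.drop i = [] := List.drop_eq_nil_of_le (by omega)
    rw [this] at hp
    exact hw (List.prefix_nil.mp hp)
  rw [pvSpecScan, dif_pos hlen, if_pos hp,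
    Nat.max_eq_right (Nat.one_le_iff_ne_zero.mpr (by simpa using hw))]

-- Source B's picked/bound loop as a recursion over the occurrence list
def pvGr (len : Int) : List Int → Int → List Int
  | [], _ => []
  | i :: t, b => if b ≤ i then i :: pvGr len t (i + len) else pvGr len t b

lemma pvFoldGreedy (len : Int) : ∀ (l : List Int) (acc : List Int) (b : Int),
    (l.foldl (fun st i => if st.2 ≤ i then (st.1 ++ [i], i + len) else st) (acc, b)).1
      = acc ++ pvGr len l b := by
  intro l
  induction l with
  | nil => intro acc b; simp [pvGr]
  | cons i t ih =>
    intro acc b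
    simp only [List.foldl_cons, pvGr]
    by_cases hb : b ≤ i
    · rw [if_pos hb, if_pos hb, ih, List.append_assoc]
      rfl
    · rw [if_neg hb, if_neg hb, ih]

lemma pvGrCongr (len : Int) : ∀ (l : List Int) (b b' : Int),
    (∀ i ∈ l, (b ≤ i ↔ b' ≤ i)) → pvGr len l b = pvGr len l b' := by
  intro l
  induction l with
  | nil => intro b b' _; rfl
  | cons i t ih =>
    intro b b' h
    simp only [pvGr]
    by_cases hb : b ≤ i
    · rw [if_pos hb, if_pos ((h i List.mem_cons_self).mp hb)]
    · rw [if_neg hb, if_neg (fun hb' => hb ((h i List.mem_cons_self).mpr hb')),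
        ih _ _ (fun j hj => h j (List.mem_cons_of_mem _ hj))]

-- the greedy selection over ALL occurrences equals the reference matcher
lemma pvGr_occ (s w : List Char) (hw : w ≠ []) :
    ∀ (fuel j b : Nat), j ≤ b → s.length ≤ j + fuel →
      pvGr (w.length : Int)
        ((PySem.List.pyRange (j : Int) (s.length : Int) 1).filter
          (fun i => PySem.Chars.startswith (s.drop i.toNat) w)) (b : Int)
      = pvSpecScan s w b := by
  have hw1 : 1 ≤ w.length := Nat.one_le_iff_ne_zero.mpr (by simpa using hw)
  intro fuel
  induction fuel with
  | zero =>
    intro j b hjb hlen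
    rw [PySem.List.pyRange_one_eq_nil (by exact_mod_cast (by omega : s.length ≤ j)),
      List.filter_nil, pvSpecScan_stop (by omega)]
    rfl
  | succ fuel ih =>
    intro j b hjb hlen
    by_cases hj : j < s.length
    · rw [PySem.List.pyRange_one_cons (by exact_mod_cast hj), List.filter_cons]
      have hcast1 : ((j : Int) + 1) = ((j + 1 : Nat) : Int) := by push_cast; ring
      by_cases hp : w <+: s.drop j
      · rw [if_pos (by simpa using (PySem.Chars.startswith_iff (s.drop j) w).mpr hp)]
        rcases Nat.eq_or_lt_of_le hjb with rfl | hlt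
        · rw [pvGr, if_pos le_rfl, pvSpecScan_match hw hp]
          congr 1
          have hcast2 : ((j : Int) + (w.length : Int)) = ((j + w.length : Nat) : Int) := by
            push_cast; ring
          rw [hcast1, hcast2]
          exact ih (j + 1) (j + w.length) (by omega) (by omega)
        · rw [pvGr, if_neg (by exact_mod_cast (by omega : ¬ ((b : Int) ≤ (j : Int)))), hcast1]
          exact ih (j + 1) b (by omega) (by omega)
      · rw [if_neg (by simpa using (fun h => hp ((PySem.Chars.startswith_iff (s.drop j) w).mp h)))]
        rcases Nat.eq_or_lt_of_le hjb with rfl | hlt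
        · rw [pvSpecScan, dif_pos hj, if_neg hp]
          have hb1 : pvGr (w.length : Int)
              ((PySem.List.pyRange ((j : Int) + 1) (s.length : Int) 1).filter
                (fun i => PySem.Chars.startswith (s.drop i.toNat) w)) ((j : Int))
              = pvGr (w.length : Int)
              ((PySem.List.pyRange ((j : Int) + 1) (s.length : Int) 1).filter
                (fun i => PySem.Chars.startswith (s.drop i.toNat) w)) ((j : Int) + 1) := by
            apply pvGrCongr
            intro i hi
            have := (PySem.List.mem_pyRange_one.mp (List.mem_of_mem_filter hi)).1
            omega
          rw [hb1, hcast1]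
          exact ih (j + 1) (j + 1) le_rfl (by omega)
        · rw [hcast1]
          exact ih (j + 1) b (by omega) (by omega)
    · rw [PySem.List.pyRange_one_eq_nil (by exact_mod_cast (by omega : s.length ≤ j)),
        List.filter_nil, pvSpecScan_stop (by omega)]
      rfl

-- a dict whose keys are unique is unchanged by re-inserting a present key's own value
lemma pvInsertGetDSelf {d : PySem.Dict String (List Int)} (k : String) (d0 : List Int)
    (hn : d.keys.Nodup) (hc : d.contains k = true) :
    d.insert k (d.getD k d0) = d := by
  apply PySem.Dict.ext
  rw [PySem.Dict.items_insert_of_contains d _ hc]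
  have : ∀ p ∈ d.items, (if p.1 == k then (k, d.getD k d0) else p) = p := by
    intro p hp
    by_cases hpk : p.1 = k
    · have hget : d.get? p.1 = some p.2 := by
        rcases p with ⟨pk, pv⟩
        exact PySem.Dict.get?_of_mem_items d hp hn
      rw [if_pos (by simp [hpk]), PySem.Dict.getD_eq_get?_getD, ← hpk, hget]
      rcases p with ⟨pk, pv⟩
      simp at hpk
      simp [hpk]
    · rw [if_neg (by simp [hpk])]
  rw [List.map_congr_left this]
  simp

lemma pvNodupSetdefault {d : PySem.Dict String (List Int)} (k : String) (v : List Int)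
    (hn : d.keys.Nodup) : (d.setdefault k v).keys.Nodup := by
  by_cases hc : d.contains k = true
  · rw [PySem.Dict.setdefault_of_contains d v hc]; exact hn
  · rw [PySem.Dict.setdefault_of_not_contains d v (by simpa using hc)]
    exact PySem.Dict.nodup_keys_insert _ _ _ hn

lemma pvNodupModify {d : PySem.Dict String (List Int)} (k : String) (d0 : List Int)
    (f : List Int → List Int) (hn : d.keys.Nodup) : (d.modify k d0 f).keys.Nodup :=
  PySem.Dict.nodup_keys_insert _ _ _ hn

lemma pvSpecScan_nil_iff {s w : List Char} (hw : w ≠ []) (i : Nat) :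
    pvSpecScan s w i = [] ↔ ∀ j, i ≤ j → ¬ w <+: s.drop j := by
  induction i using pvSpecScan.induct s w with
  | case1 i hlen hp ih =>
    rw [pvSpecScan, dif_pos hlen, if_pos hp]
    constructor
    · intro h; cases h
    · intro h; exact absurd hp (h i le_rfl)
  | case2 i hlen hp ih =>
    rw [pvSpecScan, dif_pos hlen, if_neg hp]
    rw [ih]
    constructor
    · intro h j hj
      rcases Nat.eq_or_lt_of_le hj with rfl | hj'
      · exact hp
      · exact h j hj'
    · intro h j hj; exact h j (by omega)
  | case3 i hlen =>
    rw [pvSpecScan_stop hlen]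
    constructor
    · intro _ j hj hpre
      have : s.drop j = [] := List.drop_eq_nil_of_le (by omega)
      rw [this] at hpre
      exact hw (List.prefix_nil.mp hpre)
    · intro _; rfl

lemma pvSpecScan_skip {s w : List Char} (t : Nat) :
    ∀ n i, i ≤ t → t - i ≤ n → (∀ j, i ≤ j → j < t → ¬ w <+: s.drop j) →
      pvSpecScan s w i = pvSpecScan s w t := by
  intro n
  induction n with
  | zero => intro i h1 h2 _; exact congrArg (pvSpecScan s w) (by omega : i = t)
  | succ n ih =>
    intro i h1 h2 hno
    rcases Nat.eq_or_lt_of_le h1 with rfl | hlt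
    · rfl
    · by_cases hlen : i < s.length
      · rw [pvSpecScan, dif_pos hlen, if_neg (hno i le_rfl hlt)]
        exact ih (i + 1) (by omega) (by omega) (fun j hj hj' => hno j (by omega) hj')
      · rw [pvSpecScan_stop hlen, pvSpecScan_stop (by omega)]

-- a prefix somewhere inside a suffix is an infix
lemma pvPrefixDropInfix {w s : List Char} {i j : Nat} (hij : i ≤ j)
    (hp : w <+: s.drop j) : w <:+: s.drop i := by
  have : s.drop j = (s.drop i).drop (j - i) := by
    rw [List.drop_drop]; congr 1; omega
  rw [this] at hp
  exact hp.isInfix.trans (List.drop_suffix _ _).isInfix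

lemma pvAList_eq_spec (s w : List Char) (hw : w ≠ []) :
    ∀ (fuel i : Nat), s.length ≤ i + fuel → pvAList s w i fuel = pvSpecScan s w i := by
  intro fuel
  induction fuel with
  | zero => intro i hi; rw [pvAList, pvSpecScan_stop (by omega)]
  | succ fuel ih =>
    intro i hi
    rw [pvAList]
    by_cases hlen : i < s.length
    · simp only [hlen, if_pos]
      by_cases hf : PySem.Chars.find (s.drop i) w = -1
      · rw [if_pos hf]
        rw [eq_comm, pvSpecScan_nil_iff hw]
        intro j hj hp
        exact (PySem.Chars.find_eq_neg_one_iff _ _).mp hf (pvPrefixDropInfix hj hp)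
      · rw [if_neg hf]
        have hf0 : 0 ≤ PySem.Chars.find (s.drop i) w := by
          have := PySem.Chars.neg_one_le_find (s.drop i) w
          omega
        obtain ⟨hpre, hmin⟩ := PySem.Chars.find_spec hf0
        set t := (PySem.Chars.find (s.drop i) w).toNat with ht
        have hpre' : w <+: s.drop (i + t) := by
          rw [List.drop_drop] at hpre
          exact hpre
        have hw1 : 1 ≤ w.length := Nat.one_le_iff_ne_zero.mpr (by simpa using hw)
        have hskip : pvSpecScan s w i = pvSpecScan s w (i + t) := by
          apply pvSpecScan_skip (i + t) t i (by omega) (by omega)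
          intro j hj hjt hp
          apply hmin (j - i) (by omega)
          rw [List.drop_drop]
          have : i + (j - i) = j := by omega
          rw [this]; exact hp
        rw [hskip, pvSpecScan_match hw hpre']
        have hft : PySem.Chars.find (s.drop i) w = (t : Int) := by omega
        have hcast : ((i + t : Nat) : Int) = PySem.Chars.find (s.drop i) w + (i : Int) := by
          push_cast [hft]; ring
        by_cases hi0 : i = 0
        · subst hi0
          rw [if_pos rfl]
          rw [ih (0 + (t + w.length)) (by omega)]
          congr 1
          · rw [hft]; push_cast; ring
          · congr 1; omega
        · rw [if_neg hi0, ih (i + (w.length + t)) (by omega)]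
          congr 1
          · rw [hcast]
          · congr 1; omega
    · rw [pvSpecScan_stop hlen]; simp [hlen]

-- the dict A's inner loop produces, in terms of the collected position list
lemma pvAInner_eq (s w : List Char) (key : String) :
    ∀ (fuel i : Nat) (d : PySem.Dict String (List Int)),
      pvAInner s w key i fuel d =
        if pvAList s w i fuel = [] then d
        else d.modify key [] (· ++ pvAList s w i fuel) := by
  intro fuel
  induction fuel with
  | zero => intro i d; rw [pvAInner, pvAList]; simp
  | succ fuel ih =>
    intro i d
    rw [pvAInner, pvAList]
    by_cases hlen : i < s.length
    · simp only [hlen, if_pos]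
      by_cases hf : PySem.Chars.find (s.drop i) w = -1
      · simp [hf]
      · rw [if_neg hf, if_neg hf]
        by_cases hi0 : i = 0
        · rw [if_pos hi0, if_pos hi0, ih]
          by_cases hrest : pvAList s w (i + ((PySem.Chars.find (s.drop i) w).toNat + w.length)) fuel = []
          · simp [hrest]
          · rw [if_neg hrest, if_neg (by simp), pvModifyModify]
            congr 1
            funext v
            simp
        · rw [if_neg hi0, if_neg hi0, ih]
          by_cases hrest : pvAList s w (i + (w.length + (PySem.Chars.find (s.drop i) w).toNat)) fuel = []
          · simp [hrest]
          · rw [if_neg hrest, if_neg (by simp), pvModifyModify]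
            congr 1
            funext v
            simp
    · simp [hlen]

lemma pvIsIn_iff_spec_ne_nil {s w : List Char} (hw : w ≠ []) :
    PySem.Chars.isIn w s = true ↔ pvSpecScan s w 0 ≠ [] := by
  rw [← PySem.Chars.exists_prefix_drop_iff_isIn]
  constructor
  · rintro ⟨j, hj⟩ hnil
    exact (pvSpecScan_nil_iff hw 0).mp hnil j (Nat.zero_le j) hj
  · intro hnil
    by_contra h
    exact hnil ((pvSpecScan_nil_iff hw 0).mpr (fun j _ hp => h ⟨j, hp⟩))

-- B's phase-2 step preserves unique keys
lemma pvNodupStepB (s : List Char) (w digit : String)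
    {d : PySem.Dict String (List Int)} (hn : d.keys.Nodup) :
    (if PySem.Chars.isIn w.toList s then
        (d.setdefault digit []).modify digit []
          (· ++ ((pvOcc s w.toList).foldl
            (fun st i => if st.2 ≤ i then (st.1 ++ [i], i + (w.toList.length : Int)) else st)
            (([] : List Int), (0 : Int))).1)
      else d).keys.Nodup := by
  by_cases hin : PySem.Chars.isIn w.toList s = true
  · rw [if_pos hin]; exact pvNodupModify _ _ _ (pvNodupSetdefault _ _ hn)
  · rw [if_neg hin]; exact hn

-- per-word phase-2 step of A equals B's (w = "" only reaches here with s = "")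
lemma pvStep_eq (s : List Char) (w digit : String) (hw : w.toList ≠ [] ∨ s = [])
    (d : PySem.Dict String (List Int)) (hn : d.keys.Nodup) :
    (if PySem.Chars.isIn w.toList s then
        pvAInner s w.toList digit 0 (s.length + 1)
          (if d.get? digit = none then d.insert digit [] else d)
      else d) =
    (if PySem.Chars.isIn w.toList s then
        (d.setdefault digit []).modify digit []
          (· ++ ((pvOcc s w.toList).foldl
            (fun st i => if st.2 ≤ i then (st.1 ++ [i], i + (w.toList.length : Int)) else st)
            (([] : List Int), (0 : Int))).1)
      else d) := by
  by_cases hwl : w.toList = []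
  case neg =>
    have hw' := hwl
    have hpick : ((pvOcc s w.toList).foldl
        (fun st i => if st.2 ≤ i then (st.1 ++ [i], i + (w.toList.length : Int)) else st)
        (([] : List Int), (0 : Int))).1 = pvSpecScan s w.toList 0 := by
      rw [pvFoldGreedy, List.nil_append]
      unfold pvOcc
      exact_mod_cast pvGr_occ s w.toList hw' s.length 0 0 (le_refl 0) (by omega)
    have halist : pvAList s w.toList 0 (s.length + 1) = pvSpecScan s w.toList 0 :=
      pvAList_eq_spec s w.toList hw' (s.length + 1) 0 (by omega)
    by_cases hin : PySem.Chars.isIn w.toList s = true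
    · have hne : pvSpecScan s w.toList 0 ≠ [] := (pvIsIn_iff_spec_ne_nil hw').mp hin
      rw [if_pos hin, pvEnsureEqSetdefault,
        pvAInner_eq s w.toList digit (s.length + 1) 0 (d.setdefault digit []),
        halist, if_neg hne, hpick, if_pos hin]
    · rw [if_neg hin, if_neg hin]
  case pos =>
    have hs : s = [] := by
      rcases hw with h | h
      · exact absurd hwl h
      · exact h
    subst hs
    rw [hwl]
    rw [if_pos (PySem.Chars.isIn_nil []), if_pos (PySem.Chars.isIn_nil [])]
    have hocc : pvOcc [] [] = [] := by
      unfold pvOcc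
      rw [PySem.List.pyRange_one_eq_nil (by simp)]
      rfl
    rw [pvAInner]
    simp only [List.length_nil, Nat.not_lt_zero, if_false]
    rw [pvEnsureEqSetdefault, hocc]
    simp only [List.foldl_nil]
    have hc : (d.setdefault digit []).contains digit = true := by
      rw [PySem.Dict.contains_setdefault]; simp
    rw [eq_comm]
    show (d.setdefault digit []).insert digit
        (((d.setdefault digit []).getD digit []) ++ []) = _
    rw [List.append_nil]
    exact pvInsertGetDSelf digit [] (pvNodupSetdefault _ _ hn) hc

-- phase 2: A's fold over the dict's keys equals B's fold over its pairs
lemma pvPhase2 (str : String) (spelled : List (String × String))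
    (hne : ∀ p ∈ spelled, p.1 ≠ "" ∨ str = "")
    (hnodup : (spelled.map Prod.fst).Nodup) :
    ∀ (l : List (String × String)), (∀ p ∈ l, p ∈ spelled) →
    ∀ (d : PySem.Dict String (List Int)), d.keys.Nodup →
    (l.map (·.1)).foldl (fun d w =>
        if PySem.Chars.isIn w.toList str.toList then
          let digit := ((PySem.Dict.mk spelled).get? w).getD ""
          let d' := if d.get? digit = none then d.insert digit [] else d
          pvAInner str.toList w.toList digit 0 (str.toList.length + 1) d'
        else d) d =
    l.foldl (fun d p =>
        if PySem.Chars.isIn p.1.toList str.toList then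
          (d.setdefault p.2 []).modify p.2 []
            (· ++ ((pvOcc str.toList p.1.toList).foldl
              (fun st i => if st.2 ≤ i then (st.1 ++ [i], i + (p.1.toList.length : Int)) else st)
              (([] : List Int), (0 : Int))).1)
        else d) d := by
  intro l
  induction l with
  | nil => intro _ d _; rfl
  | cons p l ih =>
    intro hmem d hn
    simp only [List.map_cons, List.foldl_cons]
    have hp : p ∈ spelled := hmem p List.mem_cons_self
    have hdigit : ((PySem.Dict.mk spelled).get? p.1).getD "" = p.2 := by
      rw [PySem.Dict.get?_of_mem_items (d := PySem.Dict.mk spelled) (k := p.1) (v := p.2) hp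
        (by rw [PySem.Dict.keys_mk]; exact hnodup)]
      rfl
    have hw : p.1.toList ≠ [] ∨ str.toList = [] := by
      rcases hne p hp with h | h
      · exact Or.inl (fun hl => h (String.toList_eq_nil_iff.mp hl))
      · exact Or.inr (by rw [h]; rfl)
    have hstep := pvStep_eq str.toList p.1 p.2 hw d hn
    simp only [hdigit]
    rw [hstep]
    exact ih (fun q hq => hmem q (List.mem_cons_of_mem _ hq)) _
      (pvNodupStepB str.toList p.1 p.2 hn)

-- ===== VERDICT (by name: the statement is the Claim_ definition above) =====
theorem determine_position_of_each_number_in_a_string_spec : Claim_equal_determine_position_of_each_number_in_a_string := by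
  intro str spelled _hdom hpre
  obtain ⟨hne, hnodup⟩ := hpre
  unfold Spec_determine_position_of_each_number_in_a_string
  unfold determine_position_of_each_number_in_a_string determine_position_of_each_number_in_a_string_alt
  simp only []
  rw [pvPhase1 str.toList]
  congr 1
  exact pvPhase2 str spelled hne hnodup spelled (fun _ hp => hp) _
    (by rw [← pvPhase1 str.toList]; exact pvPhase1_nodup str.toList)
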